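-- pv_equiv track=rewrite | github.com/MrBrantCode/unitest_baseline | mut_generate/mist_train_cf/cf_82742/solution.py | penultimate_palindrome
-- ===== SOURCE A (Python) =====
-- def is_palindrome(s):
--     return s == s[::-1]
--
-- def penultimate_palindrome(s):
--     length = len(s)
--     penult = None
--     second_last = None
--
--     for len_sub in reversed(range(2, length + 1)):
--         if second_last:
--             break
--         for start in range(0, length - len_sub + 1):
--             substr = s[start : start + len_sub]
--             if is_palindrome(substr):
--                 if not penult:
--                     penult = substr
--                 elif  substr != penult:
--                     second_last = substr
--                     break
--     return second_last
-- ===== SOURCE B (Python) =====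
-- def penultimate_palindrome(s):
--     n = len(s)
--     # DP table: rows[L-1][i] is True iff s[i:i+L] is a palindrome (O(n^2) total)
--     rows = []
--     for L in range(1, n + 1):
--         rows.append([s[i] == s[i + L - 1] and (L < 3 or rows[L - 3][i + 1])
--                      for i in range(n - L + 1)])
--     first = None
--     for L in range(n, 1, -1):
--         row = rows[L - 1]
--         for i in range(n - L + 1):
--             if row[i]:
--                 sub = s[i:i + L]
--                 if first is None:
--                     first = sub
--                 elif sub != first:
--                     return sub
--     return None
-- ===== Notes on version B (the rewrite author's own statement) =====
-- stated objective: faster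
-- what changed: Replaces the per-substring reverse-and-compare palindrome test with an O(n^2) dynamic-programming palindrome table built bottom-up by length, so the length-descending scan does O(1) checks instead of O(L) slice reversals.
import Mathlib
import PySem

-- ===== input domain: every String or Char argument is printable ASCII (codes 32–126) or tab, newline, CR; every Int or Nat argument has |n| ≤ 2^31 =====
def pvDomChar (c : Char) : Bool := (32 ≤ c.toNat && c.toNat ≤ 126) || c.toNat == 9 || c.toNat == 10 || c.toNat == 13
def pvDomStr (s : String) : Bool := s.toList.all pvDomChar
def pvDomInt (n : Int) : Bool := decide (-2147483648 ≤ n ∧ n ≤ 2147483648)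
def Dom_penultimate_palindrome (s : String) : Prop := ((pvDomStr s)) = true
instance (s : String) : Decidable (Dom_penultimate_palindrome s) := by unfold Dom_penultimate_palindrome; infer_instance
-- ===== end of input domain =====

-- B replaces A's O(L) reverse-and-compare palindrome test by an O(n^2) DP palindrome table; same scan order, O(1) checks.

-- ===== PORT A =====
-- is_palindrome(s): s == s[::-1]  (s[::-1] is reverse, PySem.List.slice?_none_none_neg_one)
def pvIsPal (l : List Char) : Bool := l == l.reverse

-- inner 'for start in range(...)' loop of A; returns (penult, second_last) after the loop/break
def pvInnerA (cs : List Char) (L : Int) : List Int → Option (List Char) → Option (List Char) × Option (List Char)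
  | [], penult => (penult, none)
  | st :: rest, penult =>
    let substr := PySem.List.slice cs (some st) (some (st + L))
    if pvIsPal substr then
      match penult with
      | none => pvInnerA cs L rest (some substr)
      | some p => if substr ≠ p then (some p, some substr) else pvInnerA cs L rest (some p)
    else pvInnerA cs L rest penult

-- outer 'for len_sub in reversed(range(2, length+1))' loop (second_last, once set, is a nonempty string, hence truthy)
def pvOuterA (cs : List Char) : List Int → Option (List Char) → Option (List Char) → Option (List Char)
  | [], _, second => second
  | L :: rest, penult, second =>
    if second.isSome then second
    else
      match pvInnerA cs L (PySem.List.pyRange 0 ((cs.length : Int) - L + 1) 1) penult with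
      | (p', s') => pvOuterA cs rest p' s'

def penultimate_palindrome (s : String) : Option String :=
  let cs := s.toList
  (pvOuterA cs ((PySem.List.pyRange 2 ((cs.length : Int) + 1) 1).reverse) none none).map String.ofList

-- ===== PORT B =====
-- one DP row: [s[i] == s[i+L-1] and (L < 3 or rows[L-3][i+1]) for i in range(n-L+1)]
-- (the list/str indices are provably in range, so the .getD defaults are never taken where Python would raise)
def pvRowB (cs : List Char) (rows : List (List Bool)) (L : Int) : List Bool :=
  (PySem.List.pyRange 0 ((cs.length : Int) - L + 1) 1).map (fun i =>
    (PySem.List.pyGet? cs i == PySem.List.pyGet? cs (i + L - 1)) &&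
    (decide (L < 3) || (PySem.List.pyGet? ((PySem.List.pyGet? rows (L - 3)).getD []) (i + 1)).getD false))

-- rows = []; for L in range(1, n+1): rows.append([...])
def pvRowsB (cs : List Char) : List (List Bool) :=
  (PySem.List.pyRange 1 ((cs.length : Int) + 1) 1).foldl (fun rows L => rows ++ [pvRowB cs rows L]) []

-- inner scan loop of B: returns (first, early-returned value if any)
def pvInnerB (cs : List Char) (L : Int) (row : List Bool) : List Int → Option (List Char) → Option (List Char) × Option (List Char)
  | [], first => (first, none)
  | i :: rest, first =>
    if (PySem.List.pyGet? row i).getD false then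
      let sub := PySem.List.slice cs (some i) (some (i + L))
      match first with
      | none => pvInnerB cs L row rest (some sub)
      | some f => if sub ≠ f then (some f, some sub) else pvInnerB cs L row rest (some f)
    else pvInnerB cs L row rest first

-- outer 'for L in range(n, 1, -1)' loop of B
def pvOuterB (cs : List Char) (rows : List (List Bool)) : List Int → Option (List Char) → Option (List Char)
  | [], _ => none
  | L :: rest, first =>
    let row := (PySem.List.pyGet? rows (L - 1)).getD []
    match pvInnerB cs L row (PySem.List.pyRange 0 ((cs.length : Int) - L + 1) 1) first with
    | (_, some r) => some r
    | (first', none) => pvOuterB cs rows rest first'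

def penultimate_palindrome_alt (s : String) : Option String :=
  let cs := s.toList
  let rows := pvRowsB cs
  (pvOuterB cs rows (PySem.List.pyRange (cs.length : Int) 1 (-1)) none).map String.ofList

-- ===== PRECONDITION & SPEC =====
def Spec_penultimate_palindrome (s : String) (out : Option String) : Prop := out = penultimate_palindrome_alt s
instance (s : String) (out : Option String) : Decidable (Spec_penultimate_palindrome s out) := by unfold Spec_penultimate_palindrome; infer_instance

-- ===== CLAIM (what is proved, stated in full; the proofs are below) =====
def Claim_equal_penultimate_palindrome : Prop := ∀ (s : String), Dom_penultimate_palindrome s → Spec_penultimate_palindrome s (penultimate_palindrome s)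

-- ===== LEMMAS AND PROOFS =====

theorem pvIsPal_cons_append (a b : Char) (m : List Char) :
    pvIsPal (a :: (m ++ [b])) = ((a == b) && pvIsPal m) := by
  simp only [pvIsPal, List.reverse_cons, List.reverse_append, List.reverse_nil, List.nil_append,
    List.cons_append]
  by_cases hab : a = b
  · subst hab; simp
  · simp only [List.cons_beq_cons]
    have : (a == b) = false := by simp [hab]
    simp [this]

theorem take_decomp (cs : List Char) (i L : Nat) (h2 : 2 ≤ L) (hle : i + L ≤ cs.length) :
    (cs.drop i).take L = cs[i]'(by omega) :: (((cs.drop (i+1)).take (L-2)) ++ [cs[i+L-1]'(by omega)]) := by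
  obtain ⟨K, rfl⟩ : ∃ K, L = K + 2 := ⟨L - 2, by omega⟩
  rw [List.drop_eq_getElem_cons (by omega : i < cs.length), List.take_succ_cons]
  congr 1
  rw [show K + 2 - 2 = K by omega, show K + 1 = K + 1 by rfl, List.take_add_one]
  congr 1
  rw [List.getElem?_drop, List.getElem?_eq_getElem (by omega)]
  simp [show i + 1 + K = i + (K + 2) - 1 by omega]

theorem row_entry (cs : List Char) (i L : Nat) (h1 : 1 ≤ L) (hle : i + L ≤ cs.length) :
    pvIsPal ((cs.drop i).take L) =
      ((cs[i]? == cs[i + L - 1]?) && (decide (L < 3) || pvIsPal ((cs.drop (i+1)).take (L - 2)))) := by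
  match L with
  | 1 =>
    rw [List.drop_eq_getElem_cons (by omega : i < cs.length), List.take_succ_cons, List.take_zero]
    simp [pvIsPal, List.getElem?_eq_getElem (by omega : i < cs.length)]
  | 2 =>
    rw [take_decomp cs i 2 (by omega) hle]
    simp only [show 2 - 2 = 0 by rfl, List.take_zero, List.nil_append]
    simp only [List.getElem?_eq_getElem (by omega : i < cs.length),
      List.getElem?_eq_getElem (by omega : i + 2 - 1 < cs.length), pvIsPal]
    cases h : cs[i] == cs[i + 2 - 1]'(by omega)
    · simp_all
    · simp_all
  | (K+3) =>
    rw [take_decomp cs i (K+3) (by omega) hle, pvIsPal_cons_append]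
    simp only [List.getElem?_eq_getElem (by omega : i < cs.length),
      List.getElem?_eq_getElem (by omega : i + (K+3) - 1 < cs.length)]
    simp [show i + (K+3) - 1 = i + (K+2) by omega, show K + 3 - 2 = K + 1 by omega]

def pvGoodRow (cs : List Char) (L : Nat) : List Bool :=
  (PySem.List.pyRange 0 ((cs.length : Int) - L + 1) 1).map (fun i => pvIsPal ((cs.drop i.toNat).take L))

theorem pvRowB_step (cs : List Char) (m : Nat) (hm : m + 1 ≤ cs.length) :
    pvRowB cs ((List.range m).map (fun j => pvGoodRow cs (j+1))) ((m:Int)+1) = pvGoodRow cs (m+1) := by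
  unfold pvRowB pvGoodRow
  rw [show ((cs.length : Int) - ((m:Int)+1) + 1) = ((cs.length : Int) - ((m+1 : Nat):Int) + 1) by push_cast; ring]
  apply List.map_congr_left
  intro i hi
  rw [PySem.List.mem_pyRange_one] at hi
  obtain ⟨hi0, hiu⟩ := hi
  obtain ⟨iN, rfl⟩ : ∃ iN : Nat, i = (iN : Int) := ⟨i.toNat, by omega⟩
  have hiu' : iN + (m + 1) ≤ cs.length := by omega
  rw [show ((iN:Int) + ((m:Int)+1) - 1) = ((iN + m : Nat) : Int) by push_cast; ring]
  rw [PySem.List.pyGet?_natCast, PySem.List.pyGet?_natCast]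
  rw [show ((iN:Int)).toNat = iN from Int.toNat_natCast iN]
  rw [row_entry cs iN (m+1) (by omega) hiu']
  rw [show iN + (m+1) - 1 = iN + m by omega]
  by_cases h3 : m + 1 < 3
  · have d1 : decide (((m:Int)+1) < 3) = true := by simp; omega
    have d2 : decide (m + 1 < 3) = true := by simp; omega
    rw [d1, d2]
    simp
  · have d1 : decide (((m:Int)+1) < 3) = false := by simp; omega
    have d2 : decide (m + 1 < 3) = false := by simp; omega
    rw [d1, d2]
    simp only [Bool.false_or]
    congr 1
    -- rows[m-2][iN+1]
    rw [show ((m:Int) + 1 - 3) = ((m - 2 : Nat) : Int) by omega]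
    rw [PySem.List.pyGet?_natCast]
    rw [List.getElem?_map, List.getElem?_range (by omega : m - 2 < m)]
    simp only [Option.map_some, Option.getD_some]
    rw [show (m - 2) + 1 = m - 1 by omega]
    rw [show ((iN:Int) + 1) = ((iN + 1 : Nat) : Int) by push_cast; ring]
    rw [show ((cs.length : Int) - ((m-1 : Nat):Int) + 1) = (((cs.length - (m-1) + 1 : Nat)) : Int) by omega]
    rw [PySem.List.pyGet?_natCast]
    rw [PySem.List.getElem?_map_pyRange_zero _ _ _ (by omega : iN + 1 < cs.length - (m-1) + 1)]
    simp only [Option.getD_some, Int.toNat_natCast]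
    rw [show m + 1 - 2 = m - 1 by omega]

theorem pvRowsB_prefix (cs : List Char) : ∀ m, m ≤ cs.length →
    (PySem.List.pyRange 1 ((m:Int)+1) 1).foldl (fun rows L => rows ++ [pvRowB cs rows L]) [] =
      (List.range m).map (fun j => pvGoodRow cs (j+1)) := by
  intro m
  induction m with
  | zero => intro _; rw [show ((0:Nat):Int) + 1 = 1 by norm_num, PySem.List.pyRange_one_eq_nil (le_refl 1)]; rfl
  | succ m ih =>
    intro hm
    rw [show (((m+1:Nat)):Int) + 1 = ((m:Int)+1) + 1 by push_cast; ring]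
    rw [PySem.List.pyRange_one_succ_right (by omega : (1:Int) ≤ (m:Int)+1)]
    rw [List.foldl_append, ih (by omega)]
    simp only [List.foldl_cons, List.foldl_nil]
    rw [pvRowB_step cs m hm]
    rw [List.range_succ, List.map_append]
    rfl

theorem pvRowsB_eq (cs : List Char) :
    pvRowsB cs = (List.range cs.length).map (fun j => pvGoodRow cs (j+1)) :=
  pvRowsB_prefix cs cs.length (le_refl _)

theorem pvOuterA_some (cs : List Char) (lens : List Int) (p : Option (List Char)) (r : List Char) :
    pvOuterA cs lens p (some r) = some r := by
  cases lens <;> simp [pvOuterA]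

theorem pvInnerB_eq_pvInnerA (cs : List Char) (L : Int) (row : List Bool) :
    ∀ (starts : List Int) (p : Option (List Char)),
      (∀ i ∈ starts, (PySem.List.pyGet? row i).getD false
          = pvIsPal (PySem.List.slice cs (some i) (some (i + L)))) →
      pvInnerB cs L row starts p = pvInnerA cs L starts p := by
  intro starts
  induction starts with
  | nil => intro p _; rfl
  | cons i rest ih =>
    intro p hrow
    have hi := hrow i (List.mem_cons_self)
    have hrest : ∀ j ∈ rest, (PySem.List.pyGet? row j).getD false
        = pvIsPal (PySem.List.slice cs (some j) (some (j + L))) :=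
      fun j hj => hrow j (List.mem_cons_of_mem _ hj)
    cases p with
    | none =>
      simp only [pvInnerB, pvInnerA, hi]
      split
      · exact ih _ hrest
      · exact ih _ hrest
    | some f =>
      simp only [pvInnerB, pvInnerA, hi]
      split
      · split
        · rfl
        · exact ih _ hrest
      · exact ih _ hrest

-- the DP row agrees with A's palindrome test on every index of the scan
theorem pvRow_lookup (cs : List Char) (L i : Int) (hL : 2 ≤ L) (hLn : L ≤ (cs.length : Int))
    (hi : i ∈ PySem.List.pyRange 0 ((cs.length : Int) - L + 1) 1) :
    (PySem.List.pyGet? ((PySem.List.pyGet? (pvRowsB cs) (L - 1)).getD []) i).getD false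
      = pvIsPal (PySem.List.slice cs (some i) (some (i + L))) := by
  rw [PySem.List.mem_pyRange_one] at hi
  obtain ⟨hi0, hiu⟩ := hi
  obtain ⟨LN, rfl⟩ : ∃ LN : Nat, L = (LN : Int) := ⟨L.toNat, by omega⟩
  obtain ⟨iN, rfl⟩ : ∃ iN : Nat, i = (iN : Int) := ⟨i.toNat, by omega⟩
  rw [pvRowsB_eq]
  rw [show ((LN:Int) - 1) = ((LN - 1 : Nat) : Int) by omega]
  rw [PySem.List.pyGet?_natCast, PySem.List.pyGet?_natCast]
  rw [List.getElem?_map, List.getElem?_range (by omega : LN - 1 < cs.length)]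
  simp only [Option.map_some, Option.getD_some]
  rw [show (LN - 1) + 1 = LN by omega]
  unfold pvGoodRow
  rw [show ((cs.length : Int) - (LN:Int) + 1) = ((cs.length - LN + 1 : Nat) : Int) by omega]
  rw [PySem.List.getElem?_map_pyRange_zero _ _ _ (by omega : iN < cs.length - LN + 1)]
  simp only [Option.getD_some, Int.toNat_natCast]
  rw [PySem.List.slice_natCast_add cs iN LN]

theorem pvOuterB_eq_pvOuterA (cs : List Char) :
    ∀ (lens : List Int) (p : Option (List Char)),
      (∀ L ∈ lens, 2 ≤ L ∧ L ≤ (cs.length : Int)) →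
      pvOuterB cs (pvRowsB cs) lens p = pvOuterA cs lens p none := by
  intro lens
  induction lens with
  | nil => intro p _; rfl
  | cons L rest ih =>
    intro p hb
    obtain ⟨hL2, hLn⟩ := hb L (List.mem_cons_self)
    have hrest : ∀ M ∈ rest, 2 ≤ M ∧ M ≤ (cs.length : Int) :=
      fun M hM => hb M (List.mem_cons_of_mem _ hM)
    simp only [pvOuterB, pvOuterA, Option.isSome_none, Bool.false_eq_true, if_false]
    rw [pvInnerB_eq_pvInnerA cs L _ _ p
      (fun i hi => pvRow_lookup cs L i hL2 hLn hi)]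
    cases h : pvInnerA cs L (PySem.List.pyRange 0 ((cs.length : Int) - L + 1) 1) p with
    | mk p' s' =>
      cases s' with
      | none => exact ih p' hrest
      | some r => rw [pvOuterA_some]

theorem pp_ports_agree (s : String) : penultimate_palindrome s = penultimate_palindrome_alt s := by
  unfold penultimate_palindrome penultimate_palindrome_alt
  dsimp only
  rw [PySem.List.pyRange_neg_one_eq_reverse]
  rw [show ((1:Int)+1) = 2 by norm_num]
  rw [pvOuterB_eq_pvOuterA s.toList _ none
    (fun L hL => by
      rw [List.mem_reverse, PySem.List.mem_pyRange_one] at hL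
      exact ⟨hL.1, by omega⟩)]

-- ===== VERDICT (by name: the statement is the Claim_ definition above) =====
theorem penultimate_palindrome_spec : Claim_equal_penultimate_palindrome := by
  intro s _
  unfold Spec_penultimate_palindrome
  exact pp_ports_agree s
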